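-- pv_equiv track=rewrite | github.com/kaydencel/lyric_generator | group12_code.py | rhyme_order
-- ===== SOURCE A (Python) =====
-- def rhyme_order(rhyme_scheme):
--     """
--     name: rhyme_order
--     parameter: rhyme_schem, a string of letters that represents a rhyme scheme
--     return: a tuple, the length of the rhyme scheme in the first entry and a dictionary of the letters and what line
--     number they correspond to
--     does: takes in a rhyme scheme and finds how long it is and the order of the rhyme
--     """
--     order = {}
--     for i in range(len(rhyme_scheme)):
--         if rhyme_scheme[i] in order:
--             order[rhyme_scheme[i]].append(i)
--         else:
--             order[rhyme_scheme[i]] = [i]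
--
--     return len(rhyme_scheme), order
-- ===== SOURCE B (Python) =====
-- def rhyme_order(rhyme_scheme):
--     letters = dict.fromkeys(rhyme_scheme)
--     order = {ch: [i for i, c in enumerate(rhyme_scheme) if c == ch]
--              for ch in letters}
--     return len(rhyme_scheme), order
-- ===== Notes on version B (the rewrite author's own statement) =====
-- stated objective: alternative
-- what changed: Replaces the single-pass branchy dict accumulation with a two-phase scheme: first an ordered dedup of the letters (dict.fromkeys), then one index-collecting comprehension per distinct letter.
import Mathlib
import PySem

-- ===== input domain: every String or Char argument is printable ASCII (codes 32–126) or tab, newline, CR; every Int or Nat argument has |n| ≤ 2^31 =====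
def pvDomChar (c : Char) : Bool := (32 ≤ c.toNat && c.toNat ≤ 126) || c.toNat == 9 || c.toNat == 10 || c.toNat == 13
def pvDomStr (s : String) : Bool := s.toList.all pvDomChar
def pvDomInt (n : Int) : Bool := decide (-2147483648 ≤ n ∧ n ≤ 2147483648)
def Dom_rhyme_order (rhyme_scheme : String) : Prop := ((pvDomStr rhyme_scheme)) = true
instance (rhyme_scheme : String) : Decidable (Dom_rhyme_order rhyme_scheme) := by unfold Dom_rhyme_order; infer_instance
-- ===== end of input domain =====

-- B replaces A's single-pass branchy dict accumulation by an ordered dedup of the letters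
-- followed by one index-collecting comprehension per distinct letter (alternative decomposition).

-- ===== PORT A =====
def rhyme_order (rhyme_scheme : String) : Int × (List (String × List Int)) :=
  let cs := rhyme_scheme.toList
  -- order = {}; for i in range(len(rhyme_scheme)): …
  let order := (PySem.List.pyRange 0 (PySem.List.len cs)).foldl
    (fun d i =>
      let k := String.ofList [PySem.List.pyGetD cs i ' ']   -- rhyme_scheme[i] (in range along pyRange)
      if d.contains k then d.modify k [] (fun v => v ++ [i])   -- order[k].append(i)
      else d.insert k [i])                                      -- order[k] = [i]
    PySem.Dict.empty
  ((PySem.List.len cs : Int), order.items)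

-- ===== PORT B =====
def rhyme_order_alt (rhyme_scheme : String) : Int × (List (String × List Int)) :=
  let ks := rhyme_scheme.toList.map (fun c => String.ofList [c])   -- the letters, as 1-char strings
  let letters := PySem.List.dedup ks                           -- dict.fromkeys(rhyme_scheme)
  ((PySem.List.len ks : Int),
   letters.map (fun ch =>
     (ch, ((PySem.List.enumerate ks).filter (fun p => p.2 == ch)).map (fun p => p.1))))

-- ===== PRECONDITION & SPEC =====
def Spec_rhyme_order (rhyme_scheme : String) (out : Int × (List (String × List Int))) : Prop := out = rhyme_order_alt rhyme_scheme
instance (rhyme_scheme : String) (out : Int × (List (String × List Int))) : Decidable (Spec_rhyme_order rhyme_scheme out) := by unfold Spec_rhyme_order; infer_instance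

-- ===== CLAIM (what is proved, stated in full; the proofs are below) =====
def Claim_equal_rhyme_order : Prop := ∀ (rhyme_scheme : String), Dom_rhyme_order rhyme_scheme → Spec_rhyme_order rhyme_scheme (rhyme_order rhyme_scheme)

-- ===== LEMMAS AND PROOFS =====

-- A's branchy update is exactly Dict.modify.
lemma step_eq_modify (d : PySem.Dict String (List Int)) (k : String) (i : Int) :
    (if d.contains k then d.modify k [] (fun v => v ++ [i]) else d.insert k [i])
      = d.modify k [] (fun v => v ++ [i]) := by
  by_cases h : d.contains k = true
  · simp [h]
  · simp only [Bool.not_eq_true] at h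
    simp [h, PySem.Dict.modify, PySem.Dict.getD_of_not_contains]

-- The accumulated dict, itemised: dedup'd letters paired with their index lists.
lemma dict_items (cs : List Char) :
    ((PySem.List.pyRange 0 (PySem.List.len cs)).foldl
       (fun d i =>
         let k := String.ofList [PySem.List.pyGetD cs i ' ']
         if d.contains k then d.modify k [] (fun v => v ++ [i]) else d.insert k [i])
       PySem.Dict.empty).items
    = (PySem.List.dedup (cs.map (fun c => String.ofList [c]))).map (fun ch =>
        (ch, ((PySem.List.enumerate (cs.map (fun c => String.ofList [c]))).filter
                (fun p => p.2 == ch)).map (fun p => p.1))) := by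
  set ks := cs.map (fun c => String.ofList [c]) with hks
  set L : List (String × Int) := (PySem.List.enumerate ks).map (fun p => (p.2, p.1)) with hL
  have hlen : PySem.List.len cs = PySem.List.len ks := by
    simp [hks, PySem.List.len]
  have hkey : ∀ (i : Int),
      String.ofList [PySem.List.pyGetD cs i ' '] = PySem.List.pyGetD ks i (String.ofList [' ']) := by
    intro i
    rw [hks, PySem.List.pyGetD_map (fun c => String.ofList [c]) cs i ' ']
  have hfold :
      ((PySem.List.pyRange 0 (PySem.List.len cs)).foldl
         (fun d i =>
           let k := String.ofList [PySem.List.pyGetD cs i ' ']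
           if d.contains k then d.modify k [] (fun v => v ++ [i]) else d.insert k [i])
         PySem.Dict.empty)
      = L.foldl (fun d p => d.modify p.1 [] (fun v => v ++ [p.2])) PySem.Dict.empty := by
    rw [hL, PySem.List.enumerate_eq_map_pyRange ks (String.ofList [' ']), List.map_map,
        List.foldl_map, hlen]
    simp only [step_eq_modify, hkey, Function.comp]
  rw [hfold]
  have hnodup : (L.foldl (fun d p => d.modify p.1 [] (fun v => v ++ [p.2]))
      PySem.Dict.empty).keys.Nodup :=
    PySem.Dict.nodup_keys_foldl_modify_key L Prod.fst [] (fun _ p v => v ++ [p.2]) _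
      PySem.Dict.nodup_keys_empty
  rw [PySem.Dict.items_eq_map_keys _ hnodup []]
  have hkeys : (L.foldl (fun d p => d.modify p.1 [] (fun v => v ++ [p.2]))
      PySem.Dict.empty).keys = PySem.List.dedup ks := by
    rw [PySem.Dict.keys_foldl_modify_key L Prod.fst [] (fun _ p v => v ++ [p.2]),
        PySem.Dict.keys_empty, PySem.Set.update_nil_left, PySem.List.dedup_eq_ofList]
    simp [hL, List.map_map, Function.comp_def, PySem.List.map_snd_enumerate]
  rw [hkeys]
  apply List.map_congr_left
  intro ch _
  refine Prod.ext rfl ?_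
  rw [PySem.Dict.getD_foldl_modify_append L PySem.Dict.empty ch, PySem.Dict.getD_empty]
  simp [hL, List.filter_map, List.map_map, Function.comp_def]

-- ===== VERDICT (by name: the statement is the Claim_ definition above) =====
theorem rhyme_order_spec : Claim_equal_rhyme_order := by
  intro s _
  unfold Spec_rhyme_order rhyme_order rhyme_order_alt
  refine Prod.ext ?_ ?_
  · simp [PySem.List.len]
  · exact dict_items s.toList
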